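-- pv_equiv track=rewrite | github.com/YashB63/GFG-Daily-Questions | Day 508/Maximize the sum of selected numbers from a sorted array to make it empty/maximize_the_sum_of_selected_numbers.py | maximizeSum
-- ===== SOURCE A (Python) =====
-- from collections import Counter
--
-- def maximizeSum (arr, n) :
--     d=Counter(arr)
--     cnt=0
--     l=sorted(d.keys(),reverse=True)
--
--     for i in l:
--         if d[i]!=0 :
--             cnt+=(i*d[i])
--
--
--             if i-1 in d:
--                 m=min(d[i],d[i-1])
--
--                 d[i-1]-=m
--
--     return cnt
-- ===== SOURCE B (Python) =====
-- def maximizeSum(arr, n):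
--     cnt = {}
--     for x in arr:
--         cnt[x] = cnt.get(x, 0) + 1
--     total = 0
--     for v in cnt:
--         if v + 1 not in cnt:
--             # v is the top of a maximal run of consecutive values; walk it downward
--             e = 0
--             w = v
--             while w in cnt:
--                 e = max(cnt[w] - e, 0)
--                 total += w * e
--                 w -= 1
--     return total
-- ===== Notes on version B (the rewrite author's own statement) =====
-- stated objective: alternative
-- what changed: Replaces A's sort of the distinct keys and stateful Counter decrements by a sort-free hash-map run decomposition: each maximal run of consecutive values is found via 'v+1 not in dict' and walked downward once with a carried effective count.
import Mathlib
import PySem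

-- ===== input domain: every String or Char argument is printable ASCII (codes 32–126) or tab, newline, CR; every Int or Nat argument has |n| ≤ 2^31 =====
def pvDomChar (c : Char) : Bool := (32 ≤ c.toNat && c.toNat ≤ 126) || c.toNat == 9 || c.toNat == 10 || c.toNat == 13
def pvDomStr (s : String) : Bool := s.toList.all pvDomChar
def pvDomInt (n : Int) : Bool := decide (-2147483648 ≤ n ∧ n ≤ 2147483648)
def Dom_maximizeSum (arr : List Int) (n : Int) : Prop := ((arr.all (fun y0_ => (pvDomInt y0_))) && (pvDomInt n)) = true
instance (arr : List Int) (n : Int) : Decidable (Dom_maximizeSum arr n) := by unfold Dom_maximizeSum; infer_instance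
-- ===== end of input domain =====

-- B replaces A's sort of the distinct keys + stateful Counter decrements by a sort-free
-- hash-map run decomposition (each maximal run of consecutive values found via 'v+1 not in dict'
-- is walked downward once, carrying the effective count); objective: alternative algorithm.

-- ===== PORT A =====
-- the body of A's 'for i in l:' loop, state = (cnt, d)
def maximizeSumLoop (s : Int × PySem.Dict Int Int) (i : Int) : Int × PySem.Dict Int Int :=
  let cnt := s.1
  let d := s.2
  if d.getD i 0 ≠ 0 then
    let cnt := cnt + i * d.getD i 0
    if d.contains (i - 1) then
      let m := min (d.getD i 0) (d.getD (i - 1) 0)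
      (cnt, d.insert (i - 1) (d.getD (i - 1) 0 - m))
    else (cnt, d)
  else (cnt, d)

def maximizeSum (arr : List Int) (n : Int) : Int :=
  let d := PySem.Dict.counter arr
  let cnt : Int := 0
  let l := PySem.List.sorted d.keys (fun x => x) true
  (l.foldl maximizeSumLoop (cnt, d)).1

-- ===== PORT B =====
-- the inner 'while w in cnt:' walk down one run of consecutive values; fuel = len(cnt)
-- bounds the walk (a run never has more members than the dict has keys)
def walkChain (d : PySem.Dict Int Int) : Nat → Int → Int → Int → Int
  | 0, _, _, total => total
  | f + 1, w, e, total =>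
    if d.contains w then
      let e' := max (d.getD w 0 - e) 0
      walkChain d f (w - 1) e' (total + w * e')
    else total

-- the body of B's 'for v in cnt:' loop
def maximizeSumAltLoop (cnt : PySem.Dict Int Int) (total : Int) (v : Int) : Int :=
  if cnt.contains (v + 1) = false then walkChain cnt cnt.size v 0 total else total

def maximizeSum_alt (arr : List Int) (n : Int) : Int :=
  let cnt := arr.foldl (fun d x => d.insert x (d.getD x 0 + 1)) PySem.Dict.empty
  cnt.keys.foldl (maximizeSumAltLoop cnt) 0

-- ===== PRECONDITION & SPEC =====
def Spec_maximizeSum (arr : List Int) (n : Int) (out : Int) : Prop := out = maximizeSum_alt arr n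
instance (arr : List Int) (n : Int) (out : Int) : Decidable (Spec_maximizeSum arr n out) := by unfold Spec_maximizeSum; infer_instance

-- ===== CLAIM (what is proved, stated in full; the proofs are below) =====
def Claim_equal_maximizeSum : Prop := ∀ (arr : List Int) (n : Int), Dom_maximizeSum arr n → Spec_maximizeSum arr n (maximizeSum arr n)

-- ===== LEMMAS AND PROOFS =====

-- effective count, fueled: E v = max(c v - E (v+1), 0) for keys, 0 otherwise
def effFuel (d : PySem.Dict Int Int) : Nat → Int → Int
  | 0, _ => 0
  | f + 1, v => if d.contains v then max (d.getD v 0 - effFuel d f (v + 1)) 0 else 0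

def numGE (d : PySem.Dict Int Int) (v : Int) : Nat := d.keys.countP (fun k => decide (v ≤ k))
def numLE (d : PySem.Dict Int Int) (v : Int) : Nat := d.keys.countP (fun k => decide (k ≤ v))

def eff (d : PySem.Dict Int Int) (v : Int) : Int := effFuel d d.keys.length v

-- per-run telescoping sum, fueled: T w = w*eff w + T (w-1) for keys, 0 otherwise
def runFuel (d : PySem.Dict Int Int) : Nat → Int → Int
  | 0, _ => 0
  | f + 1, w => if d.contains w then w * eff d w + runFuel d f (w - 1) else 0

def runSum (d : PySem.Dict Int Int) (w : Int) : Int := runFuel d d.keys.length w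

lemma countP_lt_of_mem_ge (l : List Int) (v : Int) (hv : v ∈ l) :
    l.countP (fun k => decide (v + 1 ≤ k)) < l.countP (fun k => decide (v ≤ k)) := by
  induction l with
  | nil => cases hv
  | cons a t ih =>
    have hmono : t.countP (fun k => decide (v + 1 ≤ k)) ≤ t.countP (fun k => decide (v ≤ k)) :=
      List.countP_mono_left (fun k _ hk => by simp only [decide_eq_true_eq] at *; omega)
    rcases List.mem_cons.mp hv with h | h
    · subst h
      simp only [List.countP_cons]
      split_ifs with h1 h2 <;> simp only [decide_eq_true_eq] at * <;> omega
    · have := ih h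
      simp only [List.countP_cons]
      split_ifs with h1 h2 <;> simp only [decide_eq_true_eq] at * <;> omega

lemma countP_lt_of_mem_le (l : List Int) (v : Int) (hv : v ∈ l) :
    l.countP (fun k => decide (k ≤ v - 1)) < l.countP (fun k => decide (k ≤ v)) := by
  induction l with
  | nil => cases hv
  | cons a t ih =>
    have hmono : t.countP (fun k => decide (k ≤ v - 1)) ≤ t.countP (fun k => decide (k ≤ v)) :=
      List.countP_mono_left (fun k _ hk => by simp only [decide_eq_true_eq] at *; omega)
    rcases List.mem_cons.mp hv with h | h
    · subst h
      simp only [List.countP_cons]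
      split_ifs with h1 h2 <;> simp only [decide_eq_true_eq] at * <;> omega
    · have := ih h
      simp only [List.countP_cons]
      split_ifs with h1 h2 <;> simp only [decide_eq_true_eq] at * <;> omega

lemma effFuel_succ_stable (d : PySem.Dict Int Int) :
    ∀ f v, numGE d v ≤ f → effFuel d (f + 1) v = effFuel d f v := by
  intro f
  induction f with
  | zero =>
    intro v h
    have hcv : d.contains v = false := by
      by_contra hc
      have hv : v ∈ d.keys := (PySem.Dict.contains_iff_mem_keys d v).mp (by
        cases hcc : d.contains v
        · exact absurd hcc hc
        · rfl)
      have : 0 < numGE d v := List.countP_pos_iff.mpr ⟨v, hv, by simp⟩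
      omega
    simp [effFuel, hcv]
  | succ f ih =>
    intro v h
    show effFuel d (f + 2) v = effFuel d (f + 1) v
    cases hcv : d.contains v with
    | false => simp [effFuel, hcv]
    | true =>
      have hv : v ∈ d.keys := (PySem.Dict.contains_iff_mem_keys d v).mp hcv
      have hlt : numGE d (v + 1) < numGE d v := countP_lt_of_mem_ge d.keys v hv
      have : numGE d (v + 1) ≤ f := by omega
      show (if d.contains v = true then max (d.getD v 0 - effFuel d (f+1) (v + 1)) 0 else 0)
          = (if d.contains v = true then max (d.getD v 0 - effFuel d f (v + 1)) 0 else 0)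
      rw [ih (v + 1) this]

lemma effFuel_eq_eff (d : PySem.Dict Int Int) (f : Nat) (v : Int) (h : numGE d v ≤ f) :
    effFuel d f v = eff d v := by
  have stable : ∀ g f, numGE d v ≤ f → f ≤ g → effFuel d g v = effFuel d f v := by
    intro g
    induction g with
    | zero => intro f _ hf; interval_cases f; rfl
    | succ g ihg =>
      intro f h1 h2
      rcases Nat.lt_or_ge f (g + 1) with hlt | hge
      · have hfg : f ≤ g := by omega
        calc effFuel d (g + 1) v = effFuel d g v :=
              effFuel_succ_stable d g v (le_trans h1 hfg)
          _ = effFuel d f v := ihg f h1 hfg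
      · have : f = g + 1 := by omega
        subst this; rfl
  have hlen : numGE d v ≤ d.keys.length := List.countP_le_length
  rcases Nat.le_total f d.keys.length with hle | hge
  · exact (stable d.keys.length f h hle).symm
  · exact stable f d.keys.length hlen hge

lemma eff_unfold (d : PySem.Dict Int Int) (v : Int) :
    eff d v = if d.contains v then max (d.getD v 0 - eff d (v + 1)) 0 else 0 := by
  cases hcv : d.contains v with
  | false =>
    simp only [Bool.false_eq_true, if_false]
    unfold eff
    cases hl : d.keys.length with
    | zero => rfl
    | succ f => simp [effFuel, hcv]
  | true =>
    have hv : v ∈ d.keys := (PySem.Dict.contains_iff_mem_keys d v).mp hcv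
    have hne : d.keys ≠ [] := List.ne_nil_of_mem hv
    obtain ⟨f, hf⟩ : ∃ f, d.keys.length = f + 1 := by
      cases hl : d.keys.length with
      | zero => exact absurd (List.length_eq_zero_iff.mp hl) hne
      | succ f => exact ⟨f, rfl⟩
    have hlt : numGE d (v + 1) < numGE d v := countP_lt_of_mem_ge d.keys v hv
    have hle : numGE d v ≤ d.keys.length := List.countP_le_length
    have h1 : numGE d (v + 1) ≤ f := by omega
    simp only [if_true]
    conv_lhs => rw [eff, hf]
    simp only [effFuel, hcv, if_true]
    rw [effFuel_eq_eff d f (v + 1) h1]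

lemma effFuel_nonneg (d : PySem.Dict Int Int) : ∀ f v, 0 ≤ effFuel d f v := by
  intro f
  induction f with
  | zero => intro v; exact le_refl 0
  | succ f ih =>
    intro v
    simp only [effFuel]
    split_ifs
    · exact le_max_right _ _
    · exact le_refl 0

lemma eff_nonneg (d : PySem.Dict Int Int) (v : Int) : 0 ≤ eff d v :=
  effFuel_nonneg d _ v

lemma runFuel_succ_stable (d : PySem.Dict Int Int) :
    ∀ f w, numLE d w ≤ f → runFuel d (f + 1) w = runFuel d f w := by
  intro f
  induction f with
  | zero =>
    intro w h
    have hcv : d.contains w = false := by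
      by_contra hc
      have hv : w ∈ d.keys := (PySem.Dict.contains_iff_mem_keys d w).mp (by
        cases hcc : d.contains w
        · exact absurd hcc hc
        · rfl)
      have : 0 < numLE d w := List.countP_pos_iff.mpr ⟨w, hv, by simp⟩
      omega
    simp [runFuel, hcv]
  | succ f ih =>
    intro w h
    show runFuel d (f + 2) w = runFuel d (f + 1) w
    cases hcv : d.contains w with
    | false => simp [runFuel, hcv]
    | true =>
      have hv : w ∈ d.keys := (PySem.Dict.contains_iff_mem_keys d w).mp hcv
      have hlt : numLE d (w - 1) < numLE d w := countP_lt_of_mem_le d.keys w hv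
      have h1 : numLE d (w - 1) ≤ f := by omega
      show (if d.contains w = true then w * eff d w + runFuel d (f + 1) (w - 1) else 0)
          = (if d.contains w = true then w * eff d w + runFuel d f (w - 1) else 0)
      rw [ih (w - 1) h1]

lemma runFuel_eq_runSum (d : PySem.Dict Int Int) (f : Nat) (w : Int) (h : numLE d w ≤ f) :
    runFuel d f w = runSum d w := by
  have stable : ∀ g f, numLE d w ≤ f → f ≤ g → runFuel d g w = runFuel d f w := by
    intro g
    induction g with
    | zero => intro f _ hf; interval_cases f; rfl
    | succ g ihg =>
      intro f h1 h2
      rcases Nat.lt_or_ge f (g + 1) with hlt | hge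
      · have hfg : f ≤ g := by omega
        calc runFuel d (g + 1) w = runFuel d g w :=
              runFuel_succ_stable d g w (le_trans h1 hfg)
          _ = runFuel d f w := ihg f h1 hfg
      · have : f = g + 1 := by omega
        subst this; rfl
  have hlen : numLE d w ≤ d.keys.length := List.countP_le_length
  rcases Nat.le_total f d.keys.length with hle | hge
  · exact (stable d.keys.length f h hle).symm
  · exact stable f d.keys.length hlen hge

lemma runSum_unfold (d : PySem.Dict Int Int) (w : Int) :
    runSum d w = if d.contains w then w * eff d w + runSum d (w - 1) else 0 := by
  cases hcv : d.contains w with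
  | false =>
    simp only [Bool.false_eq_true, if_false]
    unfold runSum
    cases hl : d.keys.length with
    | zero => rfl
    | succ f => simp [runFuel, hcv]
  | true =>
    have hv : w ∈ d.keys := (PySem.Dict.contains_iff_mem_keys d w).mp hcv
    have hne : d.keys ≠ [] := List.ne_nil_of_mem hv
    obtain ⟨f, hf⟩ : ∃ f, d.keys.length = f + 1 := by
      cases hl : d.keys.length with
      | zero => exact absurd (List.length_eq_zero_iff.mp hl) hne
      | succ f => exact ⟨f, rfl⟩
    have hlt : numLE d (w - 1) < numLE d w := countP_lt_of_mem_le d.keys w hv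
    have hle : numLE d w ≤ d.keys.length := List.countP_le_length
    have h1 : numLE d (w - 1) ≤ f := by omega
    simp only [if_true]
    conv_lhs => rw [runSum, hf]
    simp only [runFuel, hcv, if_true]
    rw [runFuel_eq_runSum d f (w - 1) h1]

lemma walkChain_eq (d : PySem.Dict Int Int) :
    ∀ (f : Nat) (w e total : Int), e = eff d (w + 1) →
      walkChain d f w e total = total + runFuel d f w := by
  intro f
  induction f with
  | zero => intro w e total he; simp [walkChain, runFuel]
  | succ f ih =>
    intro w e total he
    cases hcv : d.contains w with
    | false => simp [walkChain, runFuel, hcv]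
    | true =>
      have heff : max (d.getD w 0 - e) 0 = eff d w := by
        rw [he, eff_unfold d w, hcv]
        simp
      have hstep : eff d w = eff d ((w - 1) + 1) := by
        have : (w - 1) + 1 = w := by omega
        rw [this]
      simp only [walkChain, runFuel, hcv, if_true]
      rw [heff, ih (w - 1) (eff d w) (total + w * eff d w) hstep]
      ring

lemma sum_map_ite_single (r : List Int) (a : Int) (x : Int) (f : Int → Int)
    (hnd : r.Nodup) (ha : a ∈ r) :
    (r.map (fun v => if v = a then x else f v)).sum = (r.map f).sum - f a + x := by
  induction r with
  | nil => cases ha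
  | cons b t ih =>
    have hnd' : t.Nodup := (List.nodup_cons.mp hnd).2
    simp only [List.map_cons, List.sum_cons]
    by_cases hb : b = a
    · subst hb
      have hbt : b ∉ t := (List.nodup_cons.mp hnd).1
      have : t.map (fun v => if v = b then x else f v) = t.map f :=
        List.map_congr_left (fun v hv => by
          have : v ≠ b := fun h => hbt (h ▸ hv)
          simp [this])
      rw [this]
      simp
      ring
    · have hat : a ∈ t := by
        rcases List.mem_cons.mp ha with h | h
        · exact absurd h.symm hb
        · exact h
      rw [if_neg hb, ih hnd' hat]
      ring

-- chains partition the keys: summing runSum over run heads = summing v*eff v over all keys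
lemma core_partition (d : PySem.Dict Int Int) :
    ∀ l : List Int, l.Pairwise (· < ·) → (∀ v ∈ l, d.contains v = true) →
      (∀ w, d.contains w = true → w ∉ l → ∀ v ∈ l, v < w) →
      (l.map (fun v => if v + 1 ∈ l then 0 else runSum d v)).sum
        = (l.map (fun v => v * eff d v)).sum := by
  intro l
  induction l using List.reverseRecOn with
  | nil => intro _ _ _; simp
  | append_singleton r M ih =>
    intro hpw hmem hdc
    have hpwr : r.Pairwise (· < ·) := (List.pairwise_append.mp hpw).1
    have hrM : ∀ v ∈ r, v < M := fun v hv =>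
      (List.pairwise_append.mp hpw).2.2 v hv M (List.mem_singleton_self M)
    have hMK : d.contains M = true := hmem M (by simp)
    have hM1nr : M + 1 ∉ r := fun h => absurd (hrM _ h) (by omega)
    have hMnr : M ∉ r := fun h => absurd (hrM _ h) (by omega)
    have hmemr : ∀ v ∈ r, d.contains v = true := fun v hv => hmem v (by simp [hv])
    have hdcr : ∀ w, d.contains w = true → w ∉ r → ∀ v ∈ r, v < w := by
      intro w hw hwr v hv
      by_cases hwM : w = M
      · exact hwM ▸ hrM v hv
      · exact hdc w hw (by simp [hwr, hwM]) v (by simp [hv])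
    have ihr := ih hpwr hmemr hdcr
    simp only [List.map_append, List.sum_append, List.map_cons, List.map_nil,
      List.sum_cons, List.sum_nil]
    have hMterm : (if M + 1 ∈ r ++ [M] then (0 : Int) else runSum d M) = runSum d M := by
      rw [if_neg]
      intro h
      rcases List.mem_append.mp h with h | h
      · exact hM1nr h
      · simp at h
    rw [hMterm, runSum_unfold d M, if_pos hMK]
    by_cases hM1 : (M - 1) ∈ r
    · have hF : r.map (fun v => if v + 1 ∈ r ++ [M] then (0 : Int) else runSum d v)
          = r.map (fun v => if v = M - 1 then (0 : Int)
              else (if v + 1 ∈ r then (0 : Int) else runSum d v)) := by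
        apply List.map_congr_left
        intro v hv
        by_cases hvM : v = M - 1
        · subst hvM
          have h1 : M - 1 + 1 = M := by omega
          rw [if_pos (by rw [h1]; simp), if_pos rfl]
        · have hmem_iff : (v + 1 ∈ r ++ [M]) ↔ (v + 1 ∈ r) := by
            constructor
            · intro h
              rcases List.mem_append.mp h with h | h
              · exact h
              · simp at h
                exact absurd (by omega : v = M - 1) hvM
            · intro h; exact List.mem_append.mpr (Or.inl h)
          rw [if_neg hvM]
          by_cases h : v + 1 ∈ r
          · rw [if_pos (hmem_iff.mpr h), if_pos h]
          · rw [if_neg (fun hh => h (hmem_iff.mp hh)), if_neg h]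
      have hnd : r.Nodup := List.Pairwise.imp (fun h => ne_of_lt h) hpwr
      rw [hF, sum_map_ite_single r (M - 1) 0 _ hnd hM1]
      have hfM1 : (if (M - 1) + 1 ∈ r then (0 : Int) else runSum d (M - 1))
          = runSum d (M - 1) := by
        rw [if_neg]
        intro h
        have h1 : M - 1 + 1 = M := by omega
        exact hMnr (h1 ▸ h)
      rw [hfM1, ihr]
      ring
    · have hM1K : d.contains (M - 1) = false := by
        cases hc : d.contains (M - 1) with
        | false => rfl
        | true =>
          have hnin : (M - 1) ∉ r ++ [M] := by
            intro h
            rcases List.mem_append.mp h with h | h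
            · exact hM1 h
            · simp at h
          have := hdc (M - 1) hc hnin M (by simp)
          omega
      have hrun0 : runSum d (M - 1) = 0 := by
        rw [runSum_unfold, hM1K]; simp
      have hcongr : r.map (fun v => if v + 1 ∈ r ++ [M] then (0 : Int) else runSum d v)
          = r.map (fun v => if v + 1 ∈ r then (0 : Int) else runSum d v) := by
        apply List.map_congr_left
        intro v hv
        by_cases h : v + 1 ∈ r
        · rw [if_pos (List.mem_append.mpr (Or.inl h)), if_pos h]
        · have : v + 1 ∉ r ++ [M] := by
            intro hm
            rcases List.mem_append.mp hm with h' | h'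
            · exact h h'
            · simp at h'
              have : v = M - 1 := by omega
              exact hM1 (this ▸ hv)
          rw [if_neg this, if_neg h]
      rw [hcongr, ihr, hrun0]
      ring

-- A's loop invariant
lemma A_loop (d : PySem.Dict Int Int)
    (hpos : ∀ v, d.contains v = true → 0 < d.getD v 0) :
    ∀ (l : List Int) (d' : PySem.Dict Int Int) (cnt0 : Int),
      l.Pairwise (· > ·) →
      (∀ v ∈ l, d.contains v = true) →
      (∀ v, d'.contains v = d.contains v) →
      (∀ w, d.contains w = true → w ∉ l → ∀ v ∈ l, v < w) →
      (∀ v ∈ l, d'.getD v 0 =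
        if v + 1 ∈ l then d.getD v 0 else d.getD v 0 - min (eff d (v + 1)) (d.getD v 0)) →
      (l.foldl maximizeSumLoop (cnt0, d')).1 = cnt0 + (l.map (fun v => v * eff d v)).sum := by
  intro l
  induction l with
  | nil => intro d' cnt0 _ _ _ _ _; simp
  | cons i t ih =>
    intro d' cnt0 hpw hmem hceq hdc hinv
    have hciK : d.contains i = true := hmem i List.mem_cons_self
    have hti : ∀ v ∈ t, v < i := fun v hv => (List.pairwise_cons.mp hpw).1 v hv
    have hpwt : t.Pairwise (· > ·) := (List.pairwise_cons.mp hpw).2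
    have hmemt : ∀ v ∈ t, d.contains v = true := fun v hv => hmem v (List.mem_cons_of_mem i hv)
    have hint : i ∉ t := fun h => absurd (hti i h) (by omega)
    have hi1 : i + 1 ∉ i :: t := by
      intro h
      rcases List.mem_cons.mp h with h | h
      · omega
      · exact absurd (hti _ h) (by omega)
    have hdi : d'.getD i 0 = d.getD i 0 - min (eff d (i + 1)) (d.getD i 0) := by
      have h0 := hinv i List.mem_cons_self
      rwa [if_neg hi1] at h0
    have hEi : eff d i = d.getD i 0 - min (eff d (i + 1)) (d.getD i 0) := by
      rw [eff_unfold d i, if_pos hciK]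
      have hnn := eff_nonneg d (i + 1)
      rcases le_total (eff d (i + 1)) (d.getD i 0) with h | h
      · rw [min_eq_left h, max_eq_left (by omega)]
      · rw [min_eq_right h, max_eq_right (by omega)]
        omega
    have hdiE : d'.getD i 0 = eff d i := by rw [hdi, hEi]
    have hdct : ∀ w, d.contains w = true → w ∉ t → ∀ v ∈ t, v < w := by
      intro w hw hwt v hv
      by_cases hwi : w = i
      · exact hwi ▸ hti v hv
      · exact hdc w hw (by simp [hwt, hwi]) v (List.mem_cons_of_mem i hv)
    simp only [List.foldl_cons, List.map_cons, List.sum_cons]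
    by_cases hE0 : eff d i = 0
    · have hstep : maximizeSumLoop (cnt0, d') i = (cnt0, d') := by
        simp [maximizeSumLoop, hdiE, hE0]
      rw [hstep]
      have hinvt : ∀ v ∈ t, d'.getD v 0 =
          if v + 1 ∈ t then d.getD v 0
          else d.getD v 0 - min (eff d (v + 1)) (d.getD v 0) := by
        intro v hv
        have h0 := hinv v (List.mem_cons_of_mem i hv)
        by_cases hv1 : v + 1 ∈ t
        · rw [if_pos (List.mem_cons_of_mem i hv1)] at h0
          rw [if_pos hv1, h0]
        · by_cases hv1i : v + 1 = i
          · rw [if_pos (by rw [hv1i]; exact List.mem_cons_self)] at h0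
            rw [if_neg hv1, h0, hv1i, hE0]
            have hcv : d.contains v = true := hmemt v hv
            have := hpos v hcv
            rw [min_eq_left (by omega)]
            omega
          · rw [if_neg (by
              intro h
              rcases List.mem_cons.mp h with h | h
              · exact hv1i h
              · exact hv1 h)] at h0
            rw [if_neg hv1, h0]
      rw [ih d' cnt0 hpwt hmemt hceq hdct hinvt, hE0]
      ring
    · have hne : d'.getD i 0 ≠ 0 := by rw [hdiE]; exact hE0
      by_cases hci1 : d.contains (i - 1) = true
      · have hci1' : d'.contains (i - 1) = true := by rw [hceq]; exact hci1
        have hi1t : i - 1 ∈ t := by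
          have hi1l : i - 1 ∈ i :: t := by
            by_contra hno
            have := hdc (i - 1) hci1 hno i List.mem_cons_self
            omega
          rcases List.mem_cons.mp hi1l with h | h
          · omega
          · exact h
        have hdi1 : d'.getD (i - 1) 0 = d.getD (i - 1) 0 := by
          have h0 := hinv (i - 1) (List.mem_cons_of_mem i hi1t)
          rwa [if_pos (by
            have : i - 1 + 1 = i := by omega
            rw [this]; exact List.mem_cons_self)] at h0
        have hstep : maximizeSumLoop (cnt0, d') i =
            (cnt0 + i * d'.getD i 0,
             d'.insert (i - 1) (d'.getD (i - 1) 0 - min (d'.getD i 0) (d'.getD (i - 1) 0))) := by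
          simp [maximizeSumLoop, hne, hci1']
        rw [hstep]
        set d'' := d'.insert (i - 1) (d'.getD (i - 1) 0 - min (d'.getD i 0) (d'.getD (i - 1) 0)) with hd''
        have hceq'' : ∀ v, d''.contains v = d.contains v := by
          intro v
          rw [hd'', PySem.Dict.contains_insert]
          by_cases hv : v = i - 1
          · subst hv
            simp [hci1]
          · have : (v == i - 1) = false := by simp [hv]
            rw [this, Bool.false_or, hceq v]
        have hinv'' : ∀ v ∈ t, d''.getD v 0 =
            if v + 1 ∈ t then d.getD v 0
            else d.getD v 0 - min (eff d (v + 1)) (d.getD v 0) := by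
          intro v hv
          by_cases hvi1 : v = i - 1
          · subst hvi1
            rw [hd'', PySem.Dict.getD_insert_self]
            have hnotin : ¬ (i - 1 + 1 ∈ t) := by
              have : i - 1 + 1 = i := by omega
              rw [this]; exact hint
            rw [if_neg hnotin]
            have : i - 1 + 1 = i := by omega
            rw [this, hdi1, hdiE, hEi]
          · rw [hd'', PySem.Dict.getD_insert_of_ne d' _ _ hvi1]
            have h0 := hinv v (List.mem_cons_of_mem i hv)
            by_cases hv1 : v + 1 ∈ t
            · rw [if_pos (List.mem_cons_of_mem i hv1)] at h0
              rw [if_pos hv1, h0]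
            · have hv1i : v + 1 ≠ i := by omega
              rw [if_neg (by
                intro h
                rcases List.mem_cons.mp h with h | h
                · exact hv1i h
                · exact hv1 h)] at h0
              rw [if_neg hv1, h0]
        rw [ih d'' (cnt0 + i * d'.getD i 0) hpwt hmemt hceq'' hdct hinv'', hdiE]
        ring
      · have hci1' : d'.contains (i - 1) = false := by rw [hceq]; exact (by
          cases h : d.contains (i - 1)
          · rfl
          · exact absurd h hci1)
        have hstep : maximizeSumLoop (cnt0, d') i = (cnt0 + i * d'.getD i 0, d') := by
          simp [maximizeSumLoop, hne, hci1']
        rw [hstep]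
        have hinvt : ∀ v ∈ t, d'.getD v 0 =
            if v + 1 ∈ t then d.getD v 0
            else d.getD v 0 - min (eff d (v + 1)) (d.getD v 0) := by
          intro v hv
          have h0 := hinv v (List.mem_cons_of_mem i hv)
          by_cases hv1 : v + 1 ∈ t
          · rw [if_pos (List.mem_cons_of_mem i hv1)] at h0
            rw [if_pos hv1, h0]
          · have hv1i : v + 1 ≠ i := by
              intro h
              have : v = i - 1 := by omega
              exact absurd (hmemt v hv) (by rw [this]; simp [hci1])
            rw [if_neg (by
              intro h
              rcases List.mem_cons.mp h with h | h
              · exact hv1i h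
              · exact hv1 h)] at h0
            rw [if_neg hv1, h0]
        rw [ih d' (cnt0 + i * d'.getD i 0) hpwt hmemt hceq hdct hinvt, hdiE]
        ring

lemma maximizeSum_eq_sum (arr : List Int) (n : Int) :
    maximizeSum arr n =
      ((PySem.Dict.counter arr).keys.map (fun v => v * eff (PySem.Dict.counter arr) v)).sum := by
  simp only [maximizeSum]
  set d := PySem.Dict.counter arr with hd
  set l := PySem.List.sorted d.keys (fun x => x) true with hl
  have hpos : ∀ v, d.contains v = true → 0 < d.getD v 0 := by
    intro v h
    rw [hd, PySem.Dict.getD_counter]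
    have hm : v ∈ arr := by
      rw [hd, PySem.Dict.contains_counter] at h
      simpa using h
    exact_mod_cast List.count_pos_iff.mpr hm
  have hndk : d.keys.Nodup := PySem.Dict.nodup_keys_counter arr
  have hperm : l.Perm d.keys := PySem.List.sorted_perm d.keys (fun x => x) true
  have hndl : l.Nodup := (hperm.nodup_iff).mpr hndk
  have hpw : l.Pairwise (· > ·) := by
    have h1 : l.Pairwise (fun a b => b ≤ a) := PySem.List.sorted_pairwise_rev d.keys (fun x => x)
    have h2 : l.Pairwise (fun a b => a ≠ b) := hndl
    exact (h1.and h2).imp (fun h => lt_of_le_of_ne h.1 (fun hh => h.2 hh.symm))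
  have hmem : ∀ v ∈ l, d.contains v = true := fun v hv =>
    (PySem.Dict.contains_iff_mem_keys d v).mpr
      ((PySem.List.mem_sorted d.keys (fun x => x) true v).mp hv)
  have hdc : ∀ w, d.contains w = true → w ∉ l → ∀ v ∈ l, v < w := by
    intro w hw hwl v _
    exact absurd ((PySem.List.mem_sorted d.keys (fun x => x) true w).mpr
      ((PySem.Dict.contains_iff_mem_keys d w).mp hw)) hwl
  have hinv : ∀ v ∈ l, d.getD v 0 =
      if v + 1 ∈ l then d.getD v 0 else d.getD v 0 - min (eff d (v + 1)) (d.getD v 0) := by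
    intro v hv
    by_cases h1 : v + 1 ∈ l
    · rw [if_pos h1]
    · rw [if_neg h1]
      have hc1 : d.contains (v + 1) = false := by
        cases hc : d.contains (v + 1)
        · rfl
        · exact absurd ((PySem.List.mem_sorted d.keys (fun x => x) true (v + 1)).mpr
            ((PySem.Dict.contains_iff_mem_keys d (v + 1)).mp hc)) h1
      have heff0 : eff d (v + 1) = 0 := by
        rw [eff_unfold, hc1]
        simp
      have hnn : 0 ≤ d.getD v 0 := by
        rw [hd, PySem.Dict.getD_counter]
        exact_mod_cast Nat.zero_le _
      rw [heff0, min_eq_left hnn]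
      omega
  rw [A_loop d hpos l d 0 hpw hmem (fun v => rfl) hdc hinv]
  rw [List.Perm.sum_eq (hperm.map (fun v => v * eff d v))]
  ring

lemma maximizeSum_alt_eq_sum (arr : List Int) (n : Int) :
    maximizeSum_alt arr n =
      ((PySem.Dict.counter arr).keys.map (fun v =>
        if (PySem.Dict.counter arr).contains (v + 1) = false
        then runSum (PySem.Dict.counter arr) v else 0)).sum := by
  simp only [maximizeSum_alt, PySem.Dict.foldl_insert_getD_add_one_eq_counter]
  set d := PySem.Dict.counter arr with hd
  have hsize : d.size = d.keys.length := by
    simp [PySem.Dict.size, PySem.Dict.keys]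
  have hbody : ∀ (acc : Int), ∀ v ∈ d.keys, maximizeSumAltLoop d acc v =
      acc + (if d.contains (v + 1) = false then runSum d v else 0) := by
    intro acc v _
    unfold maximizeSumAltLoop
    by_cases h : d.contains (v + 1) = false
    · rw [if_pos h, if_pos h]
      have he : (0 : Int) = eff d (v + 1) := by
        rw [eff_unfold, h]
        simp
      rw [walkChain_eq d d.size v 0 acc he]
      congr 1
      apply runFuel_eq_runSum
      rw [hsize]
      exact List.countP_le_length
    · rw [if_neg h, if_neg h]
      omega
  rw [PySem.List.foldl_congr_mem d.keys (maximizeSumAltLoop d) _ 0 hbody]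
  rw [PySem.List.foldl_add d.keys (fun v => if d.contains (v + 1) = false then runSum d v else 0) 0]
  ring

-- ===== VERDICT (by name: the statement is the Claim_ definition above) =====
theorem maximizeSum_spec : Claim_equal_maximizeSum := by
  intro arr n _
  unfold Spec_maximizeSum
  rw [maximizeSum_eq_sum arr n, maximizeSum_alt_eq_sum arr n]
  set d := PySem.Dict.counter arr with hd
  set S := PySem.List.sorted d.keys (fun x => x) false with hS
  have hndk : d.keys.Nodup := PySem.Dict.nodup_keys_counter arr
  have hperm : S.Perm d.keys := PySem.List.sorted_perm d.keys (fun x => x) false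
  have hndS : S.Nodup := (hperm.nodup_iff).mpr hndk
  have hmemS : ∀ v : Int, v ∈ S ↔ v ∈ d.keys := fun v =>
    PySem.List.mem_sorted d.keys (fun x => x) false v
  have hpw : S.Pairwise (· < ·) := by
    have h1 : S.Pairwise (fun a b => a ≤ b) := PySem.List.sorted_pairwise d.keys (fun x => x)
    have h2 : S.Pairwise (fun a b => a ≠ b) := hndS
    exact (h1.and h2).imp (fun h => lt_of_le_of_ne h.1 h.2)
  have hcore := core_partition d S hpw
    (fun v hv => (PySem.Dict.contains_iff_mem_keys d v).mpr ((hmemS v).mp hv))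
    (by
      intro w hw hwS v _
      exact absurd ((hmemS w).mpr ((PySem.Dict.contains_iff_mem_keys d w).mp hw)) hwS)
  have hcongr : S.map (fun v => if d.contains (v + 1) = false then runSum d v else 0)
      = S.map (fun v => if v + 1 ∈ S then 0 else runSum d v) := by
    apply List.map_congr_left
    intro v _
    by_cases h : d.contains (v + 1) = false
    · rw [if_pos h, if_neg (by
        intro hm
        rw [(PySem.Dict.contains_iff_mem_keys d (v + 1)).mpr ((hmemS (v + 1)).mp hm)] at h
        exact Bool.true_eq_false ▸ h)]
    · rw [if_neg h, if_pos (by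
        have hc : d.contains (v + 1) = true := by
          cases hcc : d.contains (v + 1)
          · exact absurd hcc h
          · rfl
        exact (hmemS (v + 1)).mpr ((PySem.Dict.contains_iff_mem_keys d (v + 1)).mp hc))]
  calc (d.keys.map (fun v => v * eff d v)).sum
      = (S.map (fun v => v * eff d v)).sum :=
        (List.Perm.sum_eq (hperm.map (fun v => v * eff d v))).symm
    _ = (S.map (fun v => if v + 1 ∈ S then 0 else runSum d v)).sum := hcore.symm
    _ = (S.map (fun v => if d.contains (v + 1) = false then runSum d v else 0)).sum :=
        congrArg List.sum hcongr.symm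
    _ = (d.keys.map (fun v => if d.contains (v + 1) = false then runSum d v else 0)).sum :=
        List.Perm.sum_eq (hperm.map _)
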